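-- pv_equiv track=rewrite | github.com/saini3108/agent_aura | src/utils/report_generator.py | _get_audit_period
-- ===== SOURCE A (Python) =====
-- from typing import Dict, Any, List, Optional
--
-- def _get_audit_period(audit_trail: List[Dict[str, Any]]) -> str:
--     """Get the audit period from audit trail"""
--     if not audit_trail:
--         return "No audit data"
--
--     timestamps = [entry.get('timestamp', '') for entry in audit_trail if entry.get('timestamp')]
--     if timestamps:
--         start_time = min(timestamps)
--         end_time = max(timestamps)
--         return f"{start_time[:10]} to {end_time[:10]}"
--
--     return "Unknown period"
-- ===== SOURCE B (Python) =====
-- def _get_audit_period(audit_trail):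
--     """Get the audit period from audit trail (single fused pass, no intermediate list)"""
--     if not audit_trail:
--         return "No audit data"
--     start = end = None
--     for entry in audit_trail:
--         ts = entry.get('timestamp', '')
--         if ts:
--             if start is None:
--                 start = end = ts
--             else:
--                 if ts < start:
--                     start = ts
--                 if ts > end:
--                     end = ts
--     if start is None:
--         return "Unknown period"
--     return f"{start[:10]} to {end[:10]}"
-- ===== Notes on version B (the rewrite author's own statement) =====
-- stated objective: alternative
-- what changed: Replaced the three-pass scheme (build a filtered timestamp list, then min(), then max()) by one fused loop that maintains running start/end extremes and never materialises the intermediate list.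
import Mathlib
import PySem

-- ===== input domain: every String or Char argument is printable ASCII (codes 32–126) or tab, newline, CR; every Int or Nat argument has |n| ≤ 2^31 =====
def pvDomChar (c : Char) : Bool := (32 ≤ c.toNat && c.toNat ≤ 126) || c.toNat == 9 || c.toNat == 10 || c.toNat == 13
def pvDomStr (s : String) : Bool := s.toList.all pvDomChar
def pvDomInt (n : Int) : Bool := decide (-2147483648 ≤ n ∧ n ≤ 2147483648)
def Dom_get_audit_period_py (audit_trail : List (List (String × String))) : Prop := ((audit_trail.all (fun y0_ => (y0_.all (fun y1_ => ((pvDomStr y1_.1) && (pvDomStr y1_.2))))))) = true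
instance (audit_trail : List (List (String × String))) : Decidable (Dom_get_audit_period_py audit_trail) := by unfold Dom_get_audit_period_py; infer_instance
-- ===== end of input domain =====

-- B replaces A's three passes (filtered list, min(), max()) by one fused loop with running extremes; objective: alternative structure, same cost.

-- ===== PORT A =====
-- entry.get('timestamp', '') on the association-list dict (first match wins)
def pvTs (entry : List (String × String)) : String :=
  (PySem.Dict.mk entry).getD "timestamp" ""

def get_audit_period_py (audit_trail : List (List (String × String))) : String :=
  if audit_trail = [] then "No audit data"
  else
    let timestamps :=
      (audit_trail.filter (fun e => decide (pvTs e ≠ ""))).map (fun e => pvTs e)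
    match PySem.List.min? timestamps (fun x => x), PySem.List.max? timestamps (fun x => x) with
    | some start_time, some end_time =>
        PySem.Str.slice start_time none (some 10) ++ " to " ++ PySem.Str.slice end_time none (some 10)
    | _, _ => "Unknown period"

-- ===== PORT B =====
-- one loop step: skip falsy timestamps, otherwise initialise or update the running (start, end)
def pvStep (acc : Option (String × String)) (entry : List (String × String)) : Option (String × String) :=
  let t := pvTs entry
  if t = "" then acc
  else
    match acc with
    | none => some (t, t)
    | some (s, e) => some (if t < s then t else s, if e < t then t else e)

def get_audit_period_py_alt (audit_trail : List (List (String × String))) : String :=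
  match audit_trail with
  | [] => "No audit data"
  | _ :: _ =>
    match audit_trail.foldl pvStep none with
    | none => "Unknown period"
    | some (s, e) =>
        PySem.Str.slice s none (some 10) ++ " to " ++ PySem.Str.slice e none (some 10)

-- ===== PRECONDITION & SPEC =====
def Spec_get_audit_period_py (audit_trail : List (List (String × String))) (out : String) : Prop := out = get_audit_period_py_alt audit_trail
instance (audit_trail : List (List (String × String))) (out : String) : Decidable (Spec_get_audit_period_py audit_trail out) := by unfold Spec_get_audit_period_py; infer_instance

-- ===== CLAIM (what is proved, stated in full; the proofs are below) =====
def Claim_equal_get_audit_period_py : Prop := ∀ (audit_trail : List (List (String × String))), Dom_get_audit_period_py audit_trail → Spec_get_audit_period_py audit_trail (get_audit_period_py audit_trail)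

-- ===== LEMMAS AND PROOFS =====

-- the timestamps A collects
def pvTss (l : List (List (String × String))) : List String :=
  (l.filter (fun e => decide (pvTs e ≠ ""))).map (fun e => pvTs e)

theorem pvTss_cons (x : List (String × String)) (l : List (List (String × String))) :
    pvTss (x :: l) = if pvTs x = "" then pvTss l else pvTs x :: pvTss l := by
  by_cases h : pvTs x = "" <;> simp [pvTss, List.filter, h]

theorem pv_if_min (t s : String) : (if t < s then t else s) = min s t := by
  rw [min_comm, min_def_lt]

theorem pv_if_max (t e : String) : (if e < t then t else e) = max e t :=
  (max_def_lt e t).symm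

theorem pv_fold_some (l : List (List (String × String))) :
    ∀ s e : String, l.foldl pvStep (some (s, e)) =
      some ((pvTss l).foldl min s, (pvTss l).foldl max e) := by
  induction l with
  | nil => intro s e; simp [pvTss]
  | cons x xs ih =>
    intro s e
    by_cases h : pvTs x = ""
    · simp [List.foldl, pvStep, h, pvTss_cons, ih]
    · rw [List.foldl_cons, pvTss_cons, if_neg h,
          show pvStep (some (s, e)) x = some (min s (pvTs x), max e (pvTs x)) from by
            simp only [pvStep, if_neg h]; rw [pv_if_min, pv_if_max],
          ih, List.foldl_cons, List.foldl_cons]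

theorem pv_fold_none (l : List (List (String × String))) :
    l.foldl pvStep none =
      match pvTss l with
      | [] => none
      | h :: t => some (t.foldl min h, t.foldl max h) := by
  induction l with
  | nil => simp [pvTss]
  | cons x xs ih =>
    by_cases h : pvTs x = ""
    · simp [List.foldl, pvStep, h, pvTss_cons, ih]
    · rw [List.foldl_cons, pvTss_cons, if_neg h,
          show pvStep none x = some (pvTs x, pvTs x) from by simp [pvStep, if_neg h],
          pv_fold_some]

-- ===== VERDICT (by name: the statement is the Claim_ definition above) =====
theorem get_audit_period_py_spec : Claim_equal_get_audit_period_py := by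
  intro audit_trail _
  unfold Spec_get_audit_period_py get_audit_period_py get_audit_period_py_alt
  match audit_trail with
  | [] => rfl
  | x :: xs =>
    simp only [reduceCtorEq, if_false]
    rw [show ((x :: xs).filter (fun e => decide (pvTs e ≠ ""))).map (fun e => pvTs e) = pvTss (x :: xs) from rfl]
    rw [pv_fold_none]
    cases h : pvTss (x :: xs) with
    | nil => rfl
    | cons hd tl => simp [PySem.List.min?_id_cons, PySem.List.max?_id_cons]
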